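-- pv_equiv track=rewrite | github.com/trilogy-data/pytrilogy | trilogy/core/processing/node_generators/select_helpers/datasource_injection.py | boolean_fully_covered
-- ===== SOURCE A (Python) =====
-- from typing import List, Tuple, TypeVar
--
-- def boolean_fully_covered(
--     start: bool,
--     end: bool,
--     ranges: List[Tuple[bool, bool]],
-- ):
--     all = []
--     for r_start, r_end in ranges:
--         if r_start is True and r_end is True:
--             all.append(True)
--         elif r_start is False and r_end is False:
--             all.append(False)
--     return set(all) == {False, True}
-- ===== SOURCE B (Python) =====
-- def boolean_fully_covered(
--     start: bool,
--     end: bool,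
--     ranges,
-- ):
--     has_true = any(r_start is True and r_end is True for r_start, r_end in ranges)
--     has_false = any(r_start is False and r_end is False for r_start, r_end in ranges)
--     return has_true and has_false
-- ===== Notes on version B (the rewrite author's own statement) =====
-- stated objective: idiomatic
-- what changed: Replaced the accumulator list plus set-equality test with two independent any() scans (has_true, has_false) whose conjunction is returned; no intermediate list or set is built.
import Mathlib
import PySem

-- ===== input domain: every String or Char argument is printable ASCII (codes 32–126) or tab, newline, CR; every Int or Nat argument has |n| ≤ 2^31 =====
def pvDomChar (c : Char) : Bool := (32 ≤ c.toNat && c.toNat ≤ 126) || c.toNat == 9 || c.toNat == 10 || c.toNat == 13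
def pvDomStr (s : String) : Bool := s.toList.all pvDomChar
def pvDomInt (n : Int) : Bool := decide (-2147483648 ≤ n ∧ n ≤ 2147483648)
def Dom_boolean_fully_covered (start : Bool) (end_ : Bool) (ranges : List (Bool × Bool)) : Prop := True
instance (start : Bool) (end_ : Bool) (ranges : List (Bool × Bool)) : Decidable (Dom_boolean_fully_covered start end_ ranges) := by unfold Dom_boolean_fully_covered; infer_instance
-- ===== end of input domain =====

-- B replaces A's accumulator-list + set-equality test with two independent any() scans (more idiomatic).


-- ===== PORT A =====
-- the 'for r_start, r_end in ranges' loop building the list `all`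
def pvAllLoop (acc : List Bool) (ranges : List (Bool × Bool)) : List Bool :=
  ranges.foldl (fun all r =>
    if r.1 = true ∧ r.2 = true then all ++ [true]
    else if r.1 = false ∧ r.2 = false then all ++ [false]
    else all) acc

def boolean_fully_covered (start : Bool) (end_ : Bool) (ranges : List (Bool × Bool)) : Bool :=
  let all := pvAllLoop [] ranges
  PySem.Set.equal (PySem.Set.ofList all) (PySem.Set.ofList [false, true])

-- ===== PORT B =====
def boolean_fully_covered_alt (start : Bool) (end_ : Bool) (ranges : List (Bool × Bool)) : Bool :=
  let has_true := ranges.any (fun r => r.1 == true && r.2 == true)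
  let has_false := ranges.any (fun r => r.1 == false && r.2 == false)
  has_true && has_false

-- ===== PRECONDITION & SPEC =====
def Spec_boolean_fully_covered (start : Bool) (end_ : Bool) (ranges : List (Bool × Bool)) (out : Bool) : Prop := out = boolean_fully_covered_alt start end_ ranges
instance (start : Bool) (end_ : Bool) (ranges : List (Bool × Bool)) (out : Bool) : Decidable (Spec_boolean_fully_covered start end_ ranges out) := by unfold Spec_boolean_fully_covered; infer_instance

-- ===== CLAIM (what is proved, stated in full; the proofs are below) =====
def Claim_equal_boolean_fully_covered : Prop := ∀ (start : Bool) (end_ : Bool) (ranges : List (Bool × Bool)), Dom_boolean_fully_covered start end_ ranges → Spec_boolean_fully_covered start end_ ranges (boolean_fully_covered start end_ ranges)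

-- ===== LEMMAS AND PROOFS =====
-- a boolean b enters A's list `all` exactly for a pair (b, b)
theorem mem_pvAllLoop (b : Bool) (ranges : List (Bool × Bool)) (acc : List Bool) :
    b ∈ pvAllLoop acc ranges ↔ b ∈ acc ∨ (b, b) ∈ ranges := by
  induction ranges generalizing acc with
  | nil => simp [pvAllLoop]
  | cons r rs ih =>
    obtain ⟨rs1, rs2⟩ := r
    simp only [pvAllLoop, List.foldl_cons] at *
    cases rs1 <;> cases rs2 <;> cases b <;>
      simp [ih, List.mem_append, or_comm, Prod.ext_iff]

theorem covered_iff (start end_ : Bool) (ranges : List (Bool × Bool)) :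
    boolean_fully_covered start end_ ranges = true ↔
      ((true, true) ∈ ranges ∧ (false, false) ∈ ranges) := by
  unfold boolean_fully_covered
  simp only [PySem.Set.equal, Bool.and_eq_true, PySem.Set.issubset_iff, PySem.Set.mem_ofList]
  constructor
  · rintro ⟨_, h2⟩
    refine ⟨?_, ?_⟩
    · have := h2 true (by simp)
      rcases (mem_pvAllLoop true ranges []).1 this with h | h
      · simp at h
      · exact h
    · have := h2 false (by simp)
      rcases (mem_pvAllLoop false ranges []).1 this with h | h
      · simp at h
      · exact h
  · rintro ⟨ht, hf⟩
    refine ⟨fun x _ => by cases x <;> simp, fun x _ => ?_⟩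
    cases x
    · exact (mem_pvAllLoop false ranges []).2 (Or.inr hf)
    · exact (mem_pvAllLoop true ranges []).2 (Or.inr ht)

theorem alt_iff (start end_ : Bool) (ranges : List (Bool × Bool)) :
    boolean_fully_covered_alt start end_ ranges = true ↔
      ((true, true) ∈ ranges ∧ (false, false) ∈ ranges) := by
  unfold boolean_fully_covered_alt
  simp only [Bool.and_eq_true, List.any_eq_true]
  constructor
  · rintro ⟨⟨r, hr, hp⟩, ⟨q, hq, hqp⟩⟩
    obtain ⟨r1, r2⟩ := r; obtain ⟨q1, q2⟩ := q
    simp at hp hqp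
    obtain ⟨h1, h2⟩ := hp; obtain ⟨h3, h4⟩ := hqp
    subst h1; subst h2; subst h3; subst h4
    exact ⟨hr, hq⟩
  · rintro ⟨ht, hf⟩
    exact ⟨⟨(true, true), ht, by simp⟩, ⟨(false, false), hf, by simp⟩⟩

-- ===== VERDICT (by name: the statement is the Claim_ definition above) =====
theorem boolean_fully_covered_spec : Claim_equal_boolean_fully_covered := by
  intro start end_ ranges _
  unfold Spec_boolean_fully_covered
  have := (covered_iff start end_ ranges).trans (alt_iff start end_ ranges).symm
  cases h1 : boolean_fully_covered start end_ ranges <;>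
    cases h2 : boolean_fully_covered_alt start end_ ranges <;>
      simp_all
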